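-- pv_equiv track=rewrite | github.com/KonovDS/stefan_enthalpy_utils | StefanPythonUtils/vtk_to_data_2d.py | enlarge
-- ===== SOURCE A (Python) =====
-- def enlarge(temperature, stride, size):
--     if stride == [1, 1]:
--         return temperature
--     ret = []
--     size[0] = int(size[0] / stride[0])
--     size[1] = int(size[1] / stride[1])
--     for i in range(size[1]):
--         for y in range(stride[1]):
--             for j in range(size[0]):
--                 for x in range(stride[0]):
--                     ret.append(temperature[i*size[0] + j])
--     return ret
-- ===== SOURCE B (Python) =====
-- def enlarge(temperature, stride, size):
--     if stride == [1, 1]: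
--         return temperature
--     size[0] = int(size[0] / stride[0])
--     size[1] = int(size[1] / stride[1])
--     w, h = size[0], size[1]
--     sx, sy = stride[0], stride[1]
--     if w <= 0 or h <= 0 or sx <= 0 or sy <= 0:
--         return []
--     # each output element is computed directly from its flat output coordinates:
--     # output row r comes from source row r // sy, output column c from source column c // sx
--     return [temperature[(r // sy) * w + c // sx]
--             for r in range(h * sy) for c in range(w * sx)]
-- ===== Notes on version B (the rewrite author's own statement) =====
-- stated objective: alternative
-- what changed: Replaces A's four nested replication loops by a single comprehension over the flat output coordinates that computes each element's source index directly as (r // sy) * w + c // sx (gather by index arithmetic instead of scatter by replication).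
import Mathlib
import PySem

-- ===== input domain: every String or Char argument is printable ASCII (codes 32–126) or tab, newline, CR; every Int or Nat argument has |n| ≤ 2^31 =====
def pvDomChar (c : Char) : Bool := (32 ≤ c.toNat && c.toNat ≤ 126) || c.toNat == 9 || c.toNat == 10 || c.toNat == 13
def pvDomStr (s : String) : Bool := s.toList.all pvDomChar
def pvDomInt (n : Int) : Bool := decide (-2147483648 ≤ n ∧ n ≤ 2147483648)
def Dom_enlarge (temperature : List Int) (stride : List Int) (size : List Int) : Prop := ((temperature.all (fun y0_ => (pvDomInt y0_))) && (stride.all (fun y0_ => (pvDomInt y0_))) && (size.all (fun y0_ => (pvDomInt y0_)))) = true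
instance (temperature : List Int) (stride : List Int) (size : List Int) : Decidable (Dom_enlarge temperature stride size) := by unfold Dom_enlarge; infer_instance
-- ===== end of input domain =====

-- B computes each output element directly from its flat output coordinates by floor-division
-- index arithmetic instead of A's four nested replication loops (alternative algorithm; both A
-- and B mutate `size` in place identically — the equivalence proved is about the return value).

-- ===== PORT A =====
-- literal port of A's four nested loops; temperature[i*size[0]+j] via pyGetD (Pre_ keeps indices in range)
def enlarge (temperature : List Int) (stride : List Int) (size : List Int) : List Int :=
  if stride = [1, 1] then temperature
  else
    let sz0 := PySem.Int.truncdiv (PySem.List.pyGetD size 0 0) (PySem.List.pyGetD stride 0 0)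
    let sz1 := PySem.Int.truncdiv (PySem.List.pyGetD size 1 0) (PySem.List.pyGetD stride 1 0)
    (PySem.List.pyRange 0 sz1 1).foldl (fun ret i =>
      (PySem.List.pyRange 0 (PySem.List.pyGetD stride 1 0) 1).foldl (fun ret _y =>
        (PySem.List.pyRange 0 sz0 1).foldl (fun ret j =>
          (PySem.List.pyRange 0 (PySem.List.pyGetD stride 0 0) 1).foldl (fun ret _x =>
            ret ++ [PySem.List.pyGetD temperature (i * sz0 + j) 0]) ret) ret) ret) []

-- ===== PORT B =====
-- literal port of Source B: guard on nonpositive dimensions, then one comprehension over the flat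
-- output coordinates, fetching temperature[(r // sy) * w + c // sx]
def enlarge_alt (temperature : List Int) (stride : List Int) (size : List Int) : List Int :=
  if stride = [1, 1] then temperature
  else
    let w := PySem.Int.truncdiv (PySem.List.pyGetD size 0 0) (PySem.List.pyGetD stride 0 0)
    let h := PySem.Int.truncdiv (PySem.List.pyGetD size 1 0) (PySem.List.pyGetD stride 1 0)
    let sx := PySem.List.pyGetD stride 0 0
    let sy := PySem.List.pyGetD stride 1 0
    if w ≤ 0 ∨ h ≤ 0 ∨ sx ≤ 0 ∨ sy ≤ 0 then []
    else
      (PySem.List.pyRange 0 (h * sy) 1).flatMap (fun r =>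
        (PySem.List.pyRange 0 (w * sx) 1).map (fun c =>
          PySem.List.pyGetD temperature (PySem.Int.floordiv r sy * w + PySem.Int.floordiv c sx) 0))

-- ===== PRECONDITION & SPEC =====
-- Pre_ excludes exactly the inputs where Python A raises: stride/size shorter than 2
-- (IndexError), a zero stride entry (ZeroDivisionError), or a temperature list too short
-- for the generated indices (IndexError); unless the stride == [1,1] early return fires.
def Pre_enlarge (temperature : List Int) (stride : List Int) (size : List Int) : Prop :=
  stride = [1, 1] ∨
  (2 ≤ stride.length ∧ 2 ≤ size.length ∧
   stride.getD 0 0 ≠ 0 ∧ stride.getD 1 0 ≠ 0 ∧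
   (0 < stride.getD 0 0 → 0 < stride.getD 1 0 →
    0 < Int.tdiv (size.getD 0 0) (stride.getD 0 0) →
    0 < Int.tdiv (size.getD 1 0) (stride.getD 1 0) →
    Int.tdiv (size.getD 0 0) (stride.getD 0 0) * Int.tdiv (size.getD 1 0) (stride.getD 1 0)
      ≤ (temperature.length : Int)))
instance (temperature : List Int) (stride : List Int) (size : List Int) : Decidable (Pre_enlarge temperature stride size) := by unfold Pre_enlarge; infer_instance

def pvWitness_enlarge : List Int × List Int × List Int := ([1, 2, 3, 4], [2, 3], [4, 3])

def Spec_enlarge (temperature : List Int) (stride : List Int) (size : List Int) (out : List Int) : Prop := out = enlarge_alt temperature stride size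
instance (temperature : List Int) (stride : List Int) (size : List Int) (out : List Int) : Decidable (Spec_enlarge temperature stride size out) := by unfold Spec_enlarge; infer_instance

-- ===== CLAIM (what is proved, stated in full; the proofs are below) =====
def Claim_equal_enlarge : Prop := ∀ (temperature : List Int) (stride : List Int) (size : List Int), Dom_enlarge temperature stride size → Pre_enlarge temperature stride size → Spec_enlarge temperature stride size (enlarge temperature stride size)

-- ===== LEMMAS AND PROOFS =====

-- a flatMap of a constant singleton is a replicate
theorem flatMap_const_singleton {α β : Type} (l : List α) (x : β) :
    l.flatMap (fun _ => [x]) = List.replicate l.length x := by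
  induction l with
  | nil => rfl
  | cons a t ih => simp [List.flatMap_cons, ih, List.replicate_succ]

-- a flatMap of a constant list is a flattened replicate
theorem flatMap_const {α β : Type} (l : List α) (xs : List β) :
    l.flatMap (fun _ => xs) = (List.replicate l.length xs).flatten := by
  induction l with
  | nil => rfl
  | cons a t ih => simp [List.flatMap_cons, ih, List.replicate_succ]

-- A's innermost x-loop appends the same element stride[0] times
theorem rep_inner (st0 : Int) (x : Int) (acc : List Int) :
    (PySem.List.pyRange 0 st0 1).foldl (fun ret _ => ret ++ [x]) acc
      = acc ++ List.replicate st0.toNat x := by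
  rw [PySem.List.foldl_append_eq_flatMap (g := fun _ => [x]),
      flatMap_const_singleton, PySem.List.length_pyRange_one]
  norm_num

-- A's j/x double loop builds one expanded row
theorem row_eq (st0 s0 : Int) (e : Int → Int) (acc : List Int) :
    (PySem.List.pyRange 0 s0 1).foldl
        (fun ret j => (PySem.List.pyRange 0 st0 1).foldl (fun ret _ => ret ++ [e j]) ret) acc
      = acc ++ (PySem.List.pyRange 0 s0 1).flatMap (fun j => List.replicate st0.toNat (e j)) := by
  have h : (fun (ret : List Int) (j : Int) =>
        (PySem.List.pyRange 0 st0 1).foldl (fun ret _ => ret ++ [e j]) ret)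
      = fun ret j => ret ++ List.replicate st0.toNat (e j) := by
    funext ret j; exact rep_inner st0 (e j) ret
  rw [h, PySem.List.foldl_append_eq_flatMap]

-- A's y/j/x triple loop repeats that row stride[1] times
theorem block_eq (st0 st1 s0 : Int) (e : Int → Int) (acc : List Int) :
    (PySem.List.pyRange 0 st1 1).foldl
        (fun ret _ => (PySem.List.pyRange 0 s0 1).foldl
          (fun ret j => (PySem.List.pyRange 0 st0 1).foldl (fun ret _ => ret ++ [e j]) ret) ret) acc
      = acc ++ (List.replicate st1.toNat
          ((PySem.List.pyRange 0 s0 1).flatMap (fun j => List.replicate st0.toNat (e j)))).flatten := by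
  have h : (fun (ret : List Int) (_ : Int) =>
        (PySem.List.pyRange 0 s0 1).foldl
          (fun ret j => (PySem.List.pyRange 0 st0 1).foldl (fun ret _ => ret ++ [e j]) ret) ret)
      = fun ret _ => ret ++ (PySem.List.pyRange 0 s0 1).flatMap
          (fun j => List.replicate st0.toNat (e j)) := by
    funext ret y; exact row_eq st0 s0 e ret
  rw [h, PySem.List.foldl_append_eq_flatMap
        (g := fun _ => (PySem.List.pyRange 0 s0 1).flatMap (fun j => List.replicate st0.toNat (e j))),
      flatMap_const, PySem.List.length_pyRange_one]
  norm_num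

-- ungrouping: a flatMap over range (a*b) keyed by r / b is a flatMap over range a of b copies
theorem flatMap_range_mul {α : Type} (a b : Nat) (hb : 0 < b) (g : Nat → List α) :
    (List.range (a * b)).flatMap (fun r => g (r / b))
      = (List.range a).flatMap (fun i => (List.replicate b (g i)).flatten) := by
  induction a with
  | zero => simp
  | succ a ih =>
    rw [Nat.succ_mul, List.range_add, List.flatMap_append, ih, List.range_succ,
        List.flatMap_append]
    congr 1
    rw [List.flatMap_map, List.flatMap_singleton]
    have hcg : ∀ k ∈ List.range b, g ((a * b + k) / b) = g a := by
      intro k hk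
      have hk' : k < b := List.mem_range.mp hk
      rw [Nat.mul_comm a b, Nat.mul_add_div hb, Nat.div_eq_of_lt hk', Nat.add_zero]
    rw [List.flatMap_congr hcg, flatMap_const, List.length_range]

-- the whole grid, over Nat ranges: index arithmetic r / SY, c / SX vs nested replication
theorem grid_eq (W H SX SY : Nat) (hSX : 0 < SX) (hSY : 0 < SY) (f : Nat → Nat → Int) :
    (List.range (H * SY)).flatMap (fun r => (List.range (W * SX)).map (fun c => f (r / SY) (c / SX)))
      = (List.range H).flatMap (fun i =>
          (List.replicate SY ((List.range W).flatMap (fun j => List.replicate SX (f i j)))).flatten) := by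
  rw [flatMap_range_mul H SY hSY (fun i => (List.range (W * SX)).map (fun c => f i (c / SX)))]
  have hrow : ∀ i : Nat, (List.range (W * SX)).map (fun c => f i (c / SX))
      = (List.range W).flatMap (fun j => List.replicate SX (f i j)) := by
    intro i
    rw [List.map_eq_flatMap, flatMap_range_mul W SX hSX (fun j => [f i j])]
    simp only [List.flatten_replicate_singleton]
  have : ∀ i ∈ List.range H,
      (List.replicate SY ((List.range (W * SX)).map (fun c => f i (c / SX)))).flatten
        = (List.replicate SY ((List.range W).flatMap (fun j => List.replicate SX (f i j)))).flatten := by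
    intro i _; rw [hrow]
  exact List.flatMap_congr this

-- the same over Int-valued pyRanges and floordiv, for positive dimensions
theorem grid_eq_int (w h sx sy : Int) (e : Int → Int)
    (hw : 0 < w) (hh : 0 < h) (hsx : 0 < sx) (hsy : 0 < sy) :
    (PySem.List.pyRange 0 h 1).flatMap (fun i =>
        (List.replicate sy.toNat
          ((PySem.List.pyRange 0 w 1).flatMap
            (fun j => List.replicate sx.toNat (e (i * w + j))))).flatten)
      = (PySem.List.pyRange 0 (h * sy) 1).flatMap (fun r =>
          (PySem.List.pyRange 0 (w * sx) 1).map (fun c =>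
            e (PySem.Int.floordiv r sy * w + PySem.Int.floordiv c sx))) := by
  obtain ⟨W, rfl⟩ : ∃ W : Nat, w = (W : Int) := ⟨w.toNat, (Int.toNat_of_nonneg hw.le).symm⟩
  obtain ⟨H, rfl⟩ : ∃ H : Nat, h = (H : Int) := ⟨h.toNat, (Int.toNat_of_nonneg hh.le).symm⟩
  obtain ⟨SX, rfl⟩ : ∃ SX : Nat, sx = (SX : Int) := ⟨sx.toNat, (Int.toNat_of_nonneg hsx.le).symm⟩
  obtain ⟨SY, rfl⟩ : ∃ SY : Nat, sy = (SY : Int) := ⟨sy.toNat, (Int.toNat_of_nonneg hsy.le).symm⟩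
  rw [show ((H : Int) * (SY : Int)) = ((H * SY : Nat) : Int) by push_cast; ring,
      show ((W : Int) * (SX : Int)) = ((W * SX : Nat) : Int) by push_cast; ring,
      PySem.List.pyRange_zero_natCast (H * SY), PySem.List.pyRange_zero_natCast (W * SX),
      PySem.List.pyRange_zero_natCast H, PySem.List.pyRange_zero_natCast W]
  simp only [List.flatMap_map, List.map_map, Int.toNat_natCast, Function.comp_def,
    PySem.Int.floordiv_natCast]
  exact (grid_eq W H SX SY (by omega) (by omega) (fun i j => e ((i : Int) * (W : Int) + (j : Int)))).symm

theorem enlarge_eq_alt (temperature stride size : List Int) :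
    enlarge temperature stride size = enlarge_alt temperature stride size := by
  unfold enlarge enlarge_alt
  by_cases hs : stride = [1, 1]
  · simp [hs]
  · simp only [if_neg hs]
    set w := PySem.Int.truncdiv (PySem.List.pyGetD size 0 0) (PySem.List.pyGetD stride 0 0) with hw
    set h := PySem.Int.truncdiv (PySem.List.pyGetD size 1 0) (PySem.List.pyGetD stride 1 0) with hh
    set sx := PySem.List.pyGetD stride 0 0 with hsx
    set sy := PySem.List.pyGetD stride 1 0 with hsy
    set e : Int → Int := fun idx => PySem.List.pyGetD temperature idx 0 with he
    -- normal form of A: foldl → flatMap of replicated rows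
    have hA : (PySem.List.pyRange 0 h 1).foldl (fun ret i =>
        (PySem.List.pyRange 0 sy 1).foldl (fun ret _y =>
          (PySem.List.pyRange 0 w 1).foldl (fun ret j =>
            (PySem.List.pyRange 0 sx 1).foldl (fun ret _x =>
              ret ++ [e (i * w + j)]) ret) ret) ret) []
        = (PySem.List.pyRange 0 h 1).flatMap (fun i =>
            (List.replicate sy.toNat
              ((PySem.List.pyRange 0 w 1).flatMap
                (fun j => List.replicate sx.toNat (e (i * w + j))))).flatten) := by
      have hf : (fun (ret : List Int) (i : Int) =>
          (PySem.List.pyRange 0 sy 1).foldl (fun ret _y =>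
            (PySem.List.pyRange 0 w 1).foldl (fun ret j =>
              (PySem.List.pyRange 0 sx 1).foldl (fun ret _x =>
                ret ++ [e (i * w + j)]) ret) ret) ret)
          = fun ret i => ret ++ (List.replicate sy.toNat
              ((PySem.List.pyRange 0 w 1).flatMap
                (fun j => List.replicate sx.toNat (e (i * w + j))))).flatten := by
        funext ret i; exact block_eq sx sy w (fun j => e (i * w + j)) ret
      rw [hf, PySem.List.foldl_append_eq_flatMap, List.nil_append]
    rw [hA]
    by_cases hpos : w ≤ 0 ∨ h ≤ 0 ∨ sx ≤ 0 ∨ sy ≤ 0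
    · -- some dimension nonpositive: both sides empty
      rw [if_pos hpos]
      rcases hpos with hw0 | hh0 | hsx0 | hsy0
      · simp [PySem.List.pyRange_one_eq_nil (show w ≤ 0 by omega)]
      · simp [PySem.List.pyRange_one_eq_nil (show h ≤ 0 by omega)]
      · simp [Int.toNat_of_nonpos hsx0]
      · simp [Int.toNat_of_nonpos hsy0]
    · rw [if_neg hpos]
      simp only [not_or, not_le] at hpos
      obtain ⟨hw0, hh0, hsx0, hsy0⟩ := hpos
      exact grid_eq_int w h sx sy e hw0 hh0 hsx0 hsy0

-- ===== VERDICT (by name: the statement is the Claim_ definition above) =====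
theorem enlarge_spec : Claim_equal_enlarge := by
  intro temperature stride size _ _
  exact enlarge_eq_alt temperature stride size
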